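-- pv_equiv track=rewrite | github.com/Simon-McIntosh/nova | nova/utilities/geom.py | turning_points
-- ===== SOURCE A (Python) =====
-- def turning_points(array):
--     # https://stackoverflow.com/questions/19936033/
--     # finding-turning-points-of-an-array-in-python
--     ''' turning_points(array) -> min_indices, max_indices
--     Finds the turning points within an 1D array
--     and returns the indices of the minimum and
--     maximum turning points in two separate lists.
--     '''
--     idx_max, idx_min = [], []
--     if (len(array) < 3):
--         return idx_min, idx_max
--
--     neutral, rising, falling = range(3)
--
--     def get_state(a, b):
--         if a < b:
--             return rising
--         if a > b:
--             return falling
--         return neutral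
--
--     ps = get_state(array[0], array[1])
--     begin = 1
--     for i in range(2, len(array)):
--         s = get_state(array[i - 1], array[i])
--         if s != neutral:
--             if ps != neutral and ps != s:
--                 if s == falling:
--                     idx_max.append((begin + i - 1) // 2)
--                 else:
--                     idx_min.append((begin + i - 1) // 2)
--             begin = i
--             ps = s
--     return idx_min, idx_max
-- ===== SOURCE B (Python) =====
-- def turning_points(array):
--     ''' turning_points(array) -> min_indices, max_indices
--     Two-pass version: first materialize the directed transitions,
--     then scan consecutive transition pairs for direction flips.
--     '''
--     idx_min, idx_max = [], []
--     if len(array) < 3: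
--         return idx_min, idx_max
--     trans = []
--     for i, (a, b) in enumerate(zip(array, array[1:]), 1):
--         if a < b:
--             trans.append((i, True))    # rising
--         elif a > b:
--             trans.append((i, False))   # falling
--     for (pi, pd), (ci, cd) in zip(trans, trans[1:]):
--         if pd != cd:
--             if cd:
--                 idx_min.append((pi + ci - 1) // 2)
--             else:
--                 idx_max.append((pi + ci - 1) // 2)
--     return idx_min, idx_max
-- ===== Notes on version B (the rewrite author's own statement) =====
-- stated objective: alternative
-- what changed: Replaces A's single pass that threads running ps/begin state through the array with two passes: first materialize the list of directed transitions (index, rising/falling), then scan consecutive transition pairs and emit a plateau-midpoint index at each direction flip.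
import Mathlib
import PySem

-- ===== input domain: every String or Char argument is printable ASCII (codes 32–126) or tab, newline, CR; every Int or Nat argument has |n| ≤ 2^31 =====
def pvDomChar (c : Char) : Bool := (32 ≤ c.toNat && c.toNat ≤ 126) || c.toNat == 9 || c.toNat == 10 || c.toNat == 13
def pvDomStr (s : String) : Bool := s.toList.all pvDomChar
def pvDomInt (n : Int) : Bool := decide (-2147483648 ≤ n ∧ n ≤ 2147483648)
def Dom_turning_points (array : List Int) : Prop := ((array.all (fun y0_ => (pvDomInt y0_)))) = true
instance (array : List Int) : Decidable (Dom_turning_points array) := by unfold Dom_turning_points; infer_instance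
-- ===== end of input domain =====

-- B replaces A's single pass threading ps/begin state with two passes: build the
-- transition list, then scan consecutive transition pairs for flips (alternative
-- decomposition, same cost).

-- ===== PORT A =====
-- A's get_state with neutral=0, rising=1, falling=2
def tpGetState (a b : Int) : Int := if a < b then 1 else if b < a then 2 else 0

-- A's 'for i in range(2, len(array))' transcribed as structural recursion over the
-- suffix of the array starting at index i, with prev = array[i-1] carried along
-- (indexing array[i-1]/array[i] is exact: the loop walks the list left to right).
def tpLoop (idx_max idx_min : List Int) (ps begin_ i prev : Int) :
    List Int → List Int × List Int
  | [] => (idx_min, idx_max)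
  | b :: rest =>
    let s := tpGetState prev b
    if s ≠ 0 then
      if ps ≠ 0 ∧ ps ≠ s then
        if s = 2 then
          tpLoop (idx_max ++ [PySem.Int.floordiv (begin_ + i - 1) 2]) idx_min s i (i + 1) b rest
        else
          tpLoop idx_max (idx_min ++ [PySem.Int.floordiv (begin_ + i - 1) 2]) s i (i + 1) b rest
      else tpLoop idx_max idx_min s i (i + 1) b rest
    else tpLoop idx_max idx_min ps begin_ (i + 1) b rest

-- 'ps = get_state(array[0], array[1]); begin = 1' then the loop from i = 2
def tpStart : List Int → List Int × List Int
  | a0 :: a1 :: rest => tpLoop [] [] (tpGetState a0 a1) 1 2 a1 rest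
  | _ => ([], [])

def turning_points (array : List Int) : List Int × List Int :=
  if array.length < 3 then ([], [])
  else tpStart array

-- ===== PORT B =====
-- first pass of Source B: enumerate(zip(array, array[1:]), 1) building (index, rising?) transitions
def tpTrans (i prev : Int) : List Int → List (Int × Bool)
  | [] => []
  | b :: rest =>
    if prev < b then (i, true) :: tpTrans (i + 1) b rest
    else if b < prev then (i, false) :: tpTrans (i + 1) b rest
    else tpTrans (i + 1) b rest

-- second pass of Source B: zip(trans, trans[1:]) — scan consecutive transition pairs
def tpScanAux (p : Int × Bool) : List (Int × Bool) → List Int × List Int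
  | [] => ([], [])
  | c :: ts =>
    let r := tpScanAux c ts
    if p.2 ≠ c.2 then
      if c.2 then (PySem.Int.floordiv (p.1 + c.1 - 1) 2 :: r.1, r.2)
      else (r.1, PySem.Int.floordiv (p.1 + c.1 - 1) 2 :: r.2)
    else r

def tpScan : List (Int × Bool) → List Int × List Int
  | [] => ([], [])
  | t :: ts => tpScanAux t ts

def tpAltStart : List Int → List Int × List Int
  | a0 :: rest => tpScan (tpTrans 1 a0 rest)
  | [] => ([], [])

def turning_points_alt (array : List Int) : List Int × List Int :=
  if array.length < 3 then ([], [])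
  else tpAltStart array

-- ===== PRECONDITION & SPEC =====
def Spec_turning_points (array : List Int) (out : List Int × List Int) : Prop := out = turning_points_alt array
instance (array : List Int) (out : List Int × List Int) : Decidable (Spec_turning_points array out) := by unfold Spec_turning_points; infer_instance

-- ===== CLAIM (what is proved, stated in full; the proofs are below) =====
def Claim_equal_turning_points : Prop := ∀ (array : List Int), Dom_turning_points array → Spec_turning_points array (turning_points array)

-- ===== LEMMAS AND PROOFS =====

-- pending-state view: A's (ps, begin) pair as the optional previous transition
def tpOpt (ps begin_ : Int) : Option (Int × Bool) :=
  if ps = 0 then none else some (begin_, ps = 1)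

def tpScanFrom : Option (Int × Bool) → List (Int × Bool) → List Int × List Int
  | none, ts => tpScan ts
  | some p, ts => tpScanAux p ts

lemma tpLoop_eq (l : List Int) : ∀ (idx_max idx_min : List Int) (ps begin_ i prev : Int),
    (ps = 0 ∨ ps = 1 ∨ ps = 2) →
    tpLoop idx_max idx_min ps begin_ i prev l =
      (idx_min ++ (tpScanFrom (tpOpt ps begin_) (tpTrans i prev l)).1,
       idx_max ++ (tpScanFrom (tpOpt ps begin_) (tpTrans i prev l)).2) := by
  induction l with
  | nil =>
    intro imax imin ps begin_ i prev hps
    rcases hps with h | h | h <;>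
      simp [tpLoop, tpTrans, tpScanFrom, tpScan, tpScanAux, tpOpt, h]
  | cons b rest ih =>
    intro imax imin ps begin_ i prev hps
    by_cases hlt : prev < b
    · -- rising transition: s = 1
      have hngt : ¬ b < prev := by omega
      rcases hps with h | h | h
      · -- ps = 0: no flip possible, state becomes (1, i)
        rw [show tpLoop imax imin ps begin_ i prev (b :: rest)
              = tpLoop imax imin 1 i (i + 1) b rest by
            simp [tpLoop, tpGetState, hlt, h]]
        rw [ih imax imin 1 i (i + 1) b (by omega)]
        simp [tpTrans, hlt, tpOpt, h, tpScanFrom, tpScan]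
      · -- ps = 1 = s: no flip
        rw [show tpLoop imax imin ps begin_ i prev (b :: rest)
              = tpLoop imax imin 1 i (i + 1) b rest by
            simp [tpLoop, tpGetState, hlt, h]]
        rw [ih imax imin 1 i (i + 1) b (by omega)]
        simp [tpTrans, hlt, tpOpt, h, tpScanFrom, tpScanAux]
      · -- ps = 2 ≠ s = 1: flip, append minimum
        rw [show tpLoop imax imin ps begin_ i prev (b :: rest)
              = tpLoop imax (imin ++ [PySem.Int.floordiv (begin_ + i - 1) 2]) 1 i (i + 1) b rest by
            simp [tpLoop, tpGetState, hlt, h]]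
        rw [ih imax (imin ++ [PySem.Int.floordiv (begin_ + i - 1) 2]) 1 i (i + 1) b (by omega)]
        simp [tpTrans, hlt, tpOpt, h, tpScanFrom, tpScanAux]
    · by_cases hgt : b < prev
      · -- falling transition: s = 2
        rcases hps with h | h | h
        · rw [show tpLoop imax imin ps begin_ i prev (b :: rest)
                = tpLoop imax imin 2 i (i + 1) b rest by
              simp [tpLoop, tpGetState, hlt, hgt, h]]
          rw [ih imax imin 2 i (i + 1) b (by omega)]
          simp [tpTrans, hlt, hgt, tpOpt, h, tpScanFrom, tpScan]
        · -- ps = 1 ≠ s = 2: flip, append maximum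
          rw [show tpLoop imax imin ps begin_ i prev (b :: rest)
                = tpLoop (imax ++ [PySem.Int.floordiv (begin_ + i - 1) 2]) imin 2 i (i + 1) b rest by
              simp [tpLoop, tpGetState, hlt, hgt, h]]
          rw [ih (imax ++ [PySem.Int.floordiv (begin_ + i - 1) 2]) imin 2 i (i + 1) b (by omega)]
          simp [tpTrans, hlt, hgt, tpOpt, h, tpScanFrom, tpScanAux]
        · -- ps = 2 = s: no flip
          rw [show tpLoop imax imin ps begin_ i prev (b :: rest)
                = tpLoop imax imin 2 i (i + 1) b rest by
              simp [tpLoop, tpGetState, hlt, hgt, h]]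
          rw [ih imax imin 2 i (i + 1) b (by omega)]
          simp [tpTrans, hlt, hgt, tpOpt, h, tpScanFrom, tpScanAux]
      · -- neutral: state unchanged, no transition recorded
        rw [show tpLoop imax imin ps begin_ i prev (b :: rest)
              = tpLoop imax imin ps begin_ (i + 1) b rest by
            simp [tpLoop, tpGetState, hlt, hgt]]
        rw [ih imax imin ps begin_ (i + 1) b hps]
        simp [tpTrans, hlt, hgt]

-- ===== VERDICT (by name: the statement is the Claim_ definition above) =====
theorem turning_points_spec : Claim_equal_turning_points := by
  intro array _
  unfold Spec_turning_points turning_points turning_points_alt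
  by_cases hlen : array.length < 3
  · simp [hlen]
  · simp only [hlen, if_false]
    obtain ⟨a0, a1, rest, rfl⟩ : ∃ a0 a1 rest, array = a0 :: a1 :: rest := by
      match array, hlen with
      | [], h => exact absurd (by simp) h
      | [a], h => exact absurd (by simp) h
      | a0 :: a1 :: rest, _ => exact ⟨a0, a1, rest, rfl⟩
    change tpLoop [] [] (tpGetState a0 a1) 1 2 a1 rest = tpScan (tpTrans 1 a0 (a1 :: rest))
    rw [tpLoop_eq rest [] [] (tpGetState a0 a1) 1 2 a1
        (by unfold tpGetState; split_ifs <;> simp)]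
    by_cases h01 : a0 < a1
    · simp [tpTrans, h01, tpGetState, tpOpt, tpScan, tpScanFrom]
    · by_cases h10 : a1 < a0
      · simp [tpTrans, h01, h10, tpGetState, tpOpt, tpScan, tpScanFrom]
      · simp [tpTrans, h01, h10, tpGetState, tpOpt, tpScanFrom]
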